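-- pv_equiv track=rewrite | github.com/christianslothouber/advent-of-code | 2015/d03/solution.py | find_visited_houses_with_robot_santa
-- ===== SOURCE A (Python) =====
-- def visit_house(instruction, point):
--     x, y = point
--
--     if instruction == '>': x += 1
--     if instruction == '<': x -= 1
--     if instruction == '^': y += 1
--     if instruction == 'v': y -= 1
--
--     house = (x, y)
--
--     return house
--
-- def find_visited_houses_with_robot_santa(instructions):
--     santa = (0, 0)
--     robot = (0, 0)
--     houses = {santa, robot}
--
--     for index, instruction in enumerate(instructions):
--         if index % 2 == 0:
--             house = visit_house(instruction, santa)
--             houses.add(house)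
--             santa = house
--         else:
--             house = visit_house(instruction, robot)
--             houses.add(house)
--             robot = house
--
--     return houses
-- ===== SOURCE B (Python) =====
-- def find_visited_houses_with_robot_santa(instructions):
--     # Parity-split decomposition: santa and robot each walk their own
--     # subsequence independently; the two trajectories are then interleaved
--     # back into visit order and deduplicated once at the end.
--     deltas = {'>': (1, 0), '<': (-1, 0), '^': (0, 1), 'v': (0, -1)}
--
--     def walk(moves):
--         x = y = 0
--         traj = []
--         for c in moves:
--             dx, dy = deltas.get(c, (0, 0))
--             x += dx
--             y += dy
--             traj.append((x, y))
--         return traj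
--
--     santa = walk(instructions[0::2])
--     robot = walk(instructions[1::2])
--     order = [(0, 0)]
--     for s, r in zip(santa, robot):
--         order.append(s)
--         order.append(r)
--     if len(santa) > len(robot):
--         order.append(santa[-1])
--     return set(order)
-- ===== Notes on version B (the rewrite author's own statement) =====
-- stated objective: alternative
-- what changed: B replaces A's single alternating loop (mutating two walkers and a set per step) by staged passes: it slices the instructions by parity into santa's and robot's move subsequences, computes each trajectory in an independent walk, interleaves the two trajectories back into visit order, and deduplicates once at the end.
import Mathlib
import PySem

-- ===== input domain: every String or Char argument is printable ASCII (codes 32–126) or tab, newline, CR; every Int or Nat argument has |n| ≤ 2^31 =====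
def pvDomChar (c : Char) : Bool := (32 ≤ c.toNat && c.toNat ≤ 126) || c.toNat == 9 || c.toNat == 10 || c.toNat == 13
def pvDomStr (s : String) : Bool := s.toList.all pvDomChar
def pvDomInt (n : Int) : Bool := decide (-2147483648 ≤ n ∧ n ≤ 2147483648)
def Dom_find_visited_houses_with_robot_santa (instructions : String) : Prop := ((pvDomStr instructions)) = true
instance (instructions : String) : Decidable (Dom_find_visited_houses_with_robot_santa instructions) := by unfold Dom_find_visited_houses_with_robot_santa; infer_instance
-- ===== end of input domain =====

-- B splits the instructions by parity into santa's and robot's subsequences, walks each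
-- independently, interleaves the two trajectories back into visit order and dedups once
-- at the end, instead of A's single alternating loop; objective: alternative, same cost.

-- ===== PORT A =====
def visit_house (instruction : Char) (point : Int × Int) : Int × Int :=
  let x := point.1
  let y := point.2
  let x := if instruction = '>' then x + 1 else x
  let x := if instruction = '<' then x - 1 else x
  let y := if instruction = '^' then y + 1 else y
  let y := if instruction = 'v' then y - 1 else y
  (x, y)

def find_visited_houses_with_robot_santa (instructions : String) : List (Int × Int) :=
  let santa : Int × Int := (0, 0)
  let robot : Int × Int := (0, 0)
  let houses : PySem.Set (Int × Int) := PySem.Set.add (PySem.Set.add PySem.Set.empty santa) robot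
  let res := (PySem.List.enumerate instructions.toList 0).foldl
    (fun (st : (Int × Int) × (Int × Int) × PySem.Set (Int × Int)) p =>
      if PySem.Int.mod p.1 2 = 0 then
        let house := visit_house p.2 st.1
        (house, st.2.1, PySem.Set.add st.2.2 house)
      else
        let house := visit_house p.2 st.2.1
        (st.1, house, PySem.Set.add st.2.2 house))
    (santa, robot, houses)
  res.2.2

-- ===== PORT B =====
-- deltas.get(c, (0, 0))
def pvDelta (c : Char) : Int × Int :=
  if c = '>' then (1, 0)
  else if c = '<' then (-1, 0)
  else if c = '^' then (0, 1)
  else if c = 'v' then (0, -1)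
  else (0, 0)

-- the inner 'walk' pass: trajectory of positions after each move
def pvTraj (x y : Int) : List Char → List (Int × Int)
  | [] => []
  | c :: cs =>
      let d := pvDelta c
      (x + d.1, y + d.2) :: pvTraj (x + d.1) (y + d.2) cs

-- instructions[0::2]  (step slice, ported by hand: exact for step 2 from offset 0)
def pvEvens : List Char → List Char
  | [] => []
  | [c] => [c]
  | c :: _ :: rest => c :: pvEvens rest

-- instructions[1::2]  (step slice, ported by hand: exact for step 2 from offset 1)
def pvOdds (cs : List Char) : List Char :=
  match cs with
  | [] => []
  | _ :: t => pvEvens t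

def find_visited_houses_with_robot_santa_alt (instructions : String) : List (Int × Int) :=
  let santa := pvTraj 0 0 (pvEvens instructions.toList)
  let robot := pvTraj 0 0 (pvOdds instructions.toList)
  -- order = [(0,0)]; for s, r in zip(santa, robot): order.append(s); order.append(r)
  let order := (santa.zip robot).foldl (fun acc p => acc ++ [p.1, p.2]) [((0 : Int), (0 : Int))]
  -- if len(santa) > len(robot): order.append(santa[-1])  (guard makes santa nonempty, so getD's default is unreachable)
  let order := if robot.length < santa.length then order ++ [santa.getLast?.getD (0, 0)] else order
  PySem.Set.ofList order

-- ===== PRECONDITION & SPEC =====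
def Spec_find_visited_houses_with_robot_santa (instructions : String) (out : List (Int × Int)) : Prop := out = find_visited_houses_with_robot_santa_alt instructions
instance (instructions : String) (out : List (Int × Int)) : Decidable (Spec_find_visited_houses_with_robot_santa instructions out) := by unfold Spec_find_visited_houses_with_robot_santa; infer_instance

-- ===== CLAIM (what is proved, stated in full; the proofs are below) =====
def Claim_equal_find_visited_houses_with_robot_santa : Prop := ∀ (instructions : String), Dom_find_visited_houses_with_robot_santa instructions → Spec_find_visited_houses_with_robot_santa instructions (find_visited_houses_with_robot_santa instructions)

-- ===== LEMMAS AND PROOFS =====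

def pvMove (p : Int × Int) (c : Char) : Int × Int :=
  (p.1 + (pvDelta c).1, p.2 + (pvDelta c).2)

-- the sequence of houses added to the set by A's loop, in order
def pvVisitSeq (santa robot : Int × Int) : List Char → List (Int × Int)
  | [] => []
  | [c] => [pvMove santa c]
  | c1 :: c2 :: rest =>
      pvMove santa c1 :: pvMove robot c2 ::
        pvVisitSeq (pvMove santa c1) (pvMove robot c2) rest

lemma visit_house_eq (c : Char) (p : Int × Int) : visit_house c p = pvMove p c := by
  by_cases h1 : c = '>'
  · subst h1; simp [visit_house, pvMove, pvDelta]
  by_cases h2 : c = '<'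
  · subst h2; simp [visit_house, pvMove, pvDelta, Prod.ext_iff]; omega
  by_cases h3 : c = '^'
  · subst h3; simp [visit_house, pvMove, pvDelta]
  by_cases h4 : c = 'v'
  · subst h4; simp [visit_house, pvMove, pvDelta, Prod.ext_iff]; omega
  simp [visit_house, pvMove, pvDelta, h1, h2, h3, h4]

-- A's fold, started at any even index, adds exactly pvVisitSeq to the set
lemma foldA_eq (santa robot : Int × Int) (cs : List Char) :
    ∀ (houses : PySem.Set (Int × Int)) (s : Int), PySem.Int.mod s 2 = 0 →
    ((PySem.List.enumerate cs s).foldl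
      (fun (st : (Int × Int) × (Int × Int) × PySem.Set (Int × Int)) p =>
        if PySem.Int.mod p.1 2 = 0 then
          let house := visit_house p.2 st.1
          (house, st.2.1, PySem.Set.add st.2.2 house)
        else
          let house := visit_house p.2 st.2.1
          (st.1, house, PySem.Set.add st.2.2 house))
      (santa, robot, houses)).2.2
      = (pvVisitSeq santa robot cs).foldl PySem.Set.add houses := by
  induction santa, robot, cs using pvVisitSeq.induct with
  | case1 santa robot => intro houses s hs; simp [PySem.List.enumerate, pvVisitSeq]
  | case2 santa robot c =>
      intro houses s hs
      rw [PySem.List.enumerate_cons, PySem.List.enumerate_nil]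
      simp only [List.foldl_cons, List.foldl_nil, hs, if_pos]
      simp [pvVisitSeq, visit_house_eq]
  | case3 santa robot c1 c2 rest ih =>
      intro houses s hs
      have hp : (0 : Int) < 2 := by norm_num
      have hs1 : PySem.Int.mod (s + 1) 2 ≠ 0 := by
        rw [PySem.Int.mod_eq_emod_of_pos hp] at hs ⊢; omega
      have hs2 : PySem.Int.mod (s + 1 + 1) 2 = 0 := by
        rw [PySem.Int.mod_eq_emod_of_pos hp] at hs ⊢; omega
      rw [PySem.List.enumerate_cons, PySem.List.enumerate_cons]
      simp only [List.foldl_cons]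
      rw [if_pos hs, if_neg hs1]
      simp only [visit_house_eq] at ih ⊢
      rw [ih _ (s + 1 + 1) hs2]
      simp [pvVisitSeq]

lemma pvEvens_cons (c : Char) (cs : List Char) : pvEvens (c :: cs) = c :: pvOdds cs := by
  cases cs <;> rfl

-- B's interleaving of the two parity trajectories is exactly A's visit sequence
lemma interleave_eq (santa robot : Int × Int) (cs : List Char) :
    (let S := pvTraj santa.1 santa.2 (pvEvens cs)
     let R := pvTraj robot.1 robot.2 (pvOdds cs)
     (S.zip R).flatMap (fun p => [p.1, p.2]) ++
       (if R.length < S.length then [S.getLast?.getD (0, 0)] else []))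
    = pvVisitSeq santa robot cs := by
  induction santa, robot, cs using pvVisitSeq.induct with
  | case1 santa robot => simp [pvEvens, pvOdds, pvTraj, pvVisitSeq]
  | case2 santa robot c =>
      simp [pvEvens, pvOdds, pvTraj, pvVisitSeq, pvMove]
  | case3 santa robot c1 c2 rest ih =>
      have he : pvEvens (c1 :: c2 :: rest) = c1 :: pvEvens rest := rfl
      have ho : pvOdds (c1 :: c2 :: rest) = c2 :: pvOdds rest := by
        show pvEvens (c2 :: rest) = c2 :: pvOdds rest
        exact pvEvens_cons c2 rest
      simp only [pvMove] at ih
      rw [he, ho]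
      simp only [pvTraj, List.zip_cons_cons, List.flatMap_cons, List.length_cons]
      set S' := pvTraj (santa.1 + (pvDelta c1).1) (santa.2 + (pvDelta c1).2) (pvEvens rest) with hS'
      set R' := pvTraj (robot.1 + (pvDelta c2).1) (robot.2 + (pvDelta c2).2) (pvOdds rest) with hR'
      by_cases hc : R'.length < S'.length
      · have hne : S' ≠ [] := by
          intro h; rw [h] at hc; simp at hc
        obtain ⟨x, xs, hx⟩ := List.exists_cons_of_ne_nil hne
        rw [if_pos (show R'.length + 1 < S'.length + 1 by omega)]
        have hlast : ((santa.1 + (pvDelta c1).1, santa.2 + (pvDelta c1).2) :: S').getLast? = S'.getLast? := by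
          rw [hx]; exact List.getLast?_cons_cons ..
        rw [hlast, if_pos hc] at *
        simp only [pvVisitSeq, pvMove]
        rw [← ih]
        simp
      · rw [if_neg (show ¬ (R'.length + 1 < S'.length + 1) by omega)]
        rw [if_neg hc] at ih
        simp only [pvVisitSeq, pvMove]
        rw [← ih]
        simp

-- ===== VERDICT (by name: the statement is the Claim_ definition above) =====
theorem find_visited_houses_with_robot_santa_spec : Claim_equal_find_visited_houses_with_robot_santa := by
  intro instructions _
  unfold Spec_find_visited_houses_with_robot_santa
  unfold find_visited_houses_with_robot_santa find_visited_houses_with_robot_santa_alt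
  simp only []
  rw [foldA_eq _ _ _ _ 0 (by decide)]
  have hB := interleave_eq ((0 : Int), (0 : Int)) ((0 : Int), (0 : Int)) instructions.toList
  simp only at hB
  rw [PySem.List.foldl_append_eq_flatMap]
  have hinit : PySem.Set.add (PySem.Set.add PySem.Set.empty ((0 : Int), (0 : Int))) ((0 : Int), (0 : Int))
      = [((0 : Int), (0 : Int))] := by decide
  rw [hinit]
  have hof : ∀ (L : List (Int × Int)), PySem.Set.ofList (((0 : Int), (0 : Int)) :: L)
      = L.foldl PySem.Set.add [((0 : Int), (0 : Int))] := by
    intro L; rfl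
  by_cases hc : (pvTraj 0 0 (pvOdds instructions.toList)).length
      < (pvTraj 0 0 (pvEvens instructions.toList)).length
  · rw [if_pos hc] at hB ⊢
    have hshape : ([((0 : Int), (0 : Int))] ++
        List.flatMap (fun p => [p.1, p.2])
          ((pvTraj 0 0 (pvEvens instructions.toList)).zip (pvTraj 0 0 (pvOdds instructions.toList))) ++
        [(pvTraj 0 0 (pvEvens instructions.toList)).getLast?.getD (0, 0)])
        = ((0 : Int), (0 : Int)) ::
          (List.flatMap (fun p => [p.1, p.2])
            ((pvTraj 0 0 (pvEvens instructions.toList)).zip (pvTraj 0 0 (pvOdds instructions.toList))) ++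
          [(pvTraj 0 0 (pvEvens instructions.toList)).getLast?.getD (0, 0)]) := by
      simp
    rw [hshape, hof, hB]
  · rw [if_neg hc] at hB ⊢
    rw [List.append_nil] at hB
    have hshape : ([((0 : Int), (0 : Int))] ++
        List.flatMap (fun p => [p.1, p.2])
          ((pvTraj 0 0 (pvEvens instructions.toList)).zip (pvTraj 0 0 (pvOdds instructions.toList))))
        = ((0 : Int), (0 : Int)) ::
          List.flatMap (fun p => [p.1, p.2])
            ((pvTraj 0 0 (pvEvens instructions.toList)).zip (pvTraj 0 0 (pvOdds instructions.toList))) := rfl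
    rw [hshape, hof, hB]
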